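-- pv_equiv track=rewrite | github.com/cutehammond772/problem-solving-archive | 백준/Silver/31909. FOCUS/FOCUS.py | solve
-- ===== SOURCE A (Python) =====
-- def change(P, cmd):
-- 	A, B = [], []
--
-- 	for x in range(8):
-- 		if (1 << x) & cmd:
-- 			A.append(x)
--
-- 	# 유효하지 않은 명령
-- 	if len(A) != 2:
-- 		return
--
-- 	i, j = A
--
-- 	for x in range(8):
-- 		if P[x] == i or P[x] == j:
-- 			B.append(x)
--
-- 	k, l = B
--
-- 	P[k], P[l] = P[l], P[k]
--
-- def solve(A, K):
-- 	# 각 점에 존재하는 키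
-- 	P = [*range(8)]
--
-- 	# 키 위치 바꾸기
-- 	for cmd in A:
-- 		change(P, cmd)
--
-- 	# K의 위치 찾기
-- 	for t in range(8):
-- 		if P[t] == K:
-- 			return t
--
-- 	return -1
-- ===== SOURCE B (Python) =====
-- def solve(A, K):
--     # Inverse view: pos[key] = point holding that key (A maintains P[point] = key).
--     pos = list(range(8))
--     for cmd in A:
--         bits = [x for x in range(8) if (1 << x) & cmd]
--         if len(bits) == 2:
--             i, j = bits
--             pos[i], pos[j] = pos[j], pos[i]
--     return pos[K] if 0 <= K < 8 else -1
-- ===== Notes on version B (the rewrite author's own statement) =====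
-- stated objective: simpler
-- what changed: B maintains the inverse permutation pos[key]=point and swaps pos[i],pos[j] directly, eliminating A's inner search loop over the board and the final scan for K.
import Mathlib
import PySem

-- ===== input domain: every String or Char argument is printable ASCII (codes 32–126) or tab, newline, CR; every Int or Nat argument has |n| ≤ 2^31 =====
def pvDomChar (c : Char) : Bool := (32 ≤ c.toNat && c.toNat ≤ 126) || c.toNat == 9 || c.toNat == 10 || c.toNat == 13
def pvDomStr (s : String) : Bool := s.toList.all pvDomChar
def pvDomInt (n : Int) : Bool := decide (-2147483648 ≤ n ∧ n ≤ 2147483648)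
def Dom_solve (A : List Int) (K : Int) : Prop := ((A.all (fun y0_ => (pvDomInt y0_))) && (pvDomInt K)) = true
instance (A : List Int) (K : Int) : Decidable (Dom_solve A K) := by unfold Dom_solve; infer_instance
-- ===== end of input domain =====

-- B maintains the inverse permutation pos[key]=point and swaps two entries directly,
-- removing A's inner search loop over the board and the final scan for K (objective: simpler).


-- ===== PORT A =====
-- change(P, cmd): collect set bits 0..7 of cmd; if exactly two (i, j), find the two board
-- positions holding keys i and j and swap them.  'i, j = A' / 'k, l = B' become the [_, _]
-- match; the fall-through branch of the second match is where Python would raise ValueError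
-- (never reached from solve, where P is always a permutation of 0..7).
def pyChange (P : List Int) (cmd : Int) : List Int :=
  let As : List Nat := (List.range 8).foldl
    (fun (acc : List Nat) (x : Nat) => if PySem.Int.band ((1 : Int) <<< x) cmd != 0 then acc ++ [x] else acc) []
  match As with
  | [i, j] =>
    let Bs : List Nat := (List.range 8).foldl
      (fun (acc : List Nat) (x : Nat) => if (P.getD x 0 == (i : Int)) || (P.getD x 0 == (j : Int)) then acc ++ [x]
                    else acc) []
    match Bs with
    | [k, l] => (P.set k (P.getD l 0)).set l (P.getD k 0)
    | _ => P
  | _ => P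

def solve (A : List Int) (K : Int) : Int :=
  let P : List Int := A.foldl pyChange ((List.range 8).map (fun n => (n : Int)))
  -- 'for t in range(8): if P[t] == K: return t' / 'return -1'
  match (List.range 8).find? (fun t => P.getD t 0 == K) with
  | some t => (t : Int)
  | none => -1

-- ===== PORT B =====
-- One step of B: decode the set bits 0..7 of cmd; if exactly two, swap pos[i] and pos[j].
def altStep (pos : List Int) (cmd : Int) : List Int :=
  match (List.range 8).filter (fun (x : Nat) => PySem.Int.band ((1 : Int) <<< x) cmd != 0) with
  | [i, j] => (pos.set i (pos.getD j 0)).set j (pos.getD i 0)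
  | _ => pos

def solve_alt (A : List Int) (K : Int) : Int :=
  let pos : List Int := A.foldl altStep ((List.range 8).map (fun n => (n : Int)))
  -- pos[K] under the guard 0 <= K < 8, so K.toNat is exact here; else -1
  if 0 ≤ K ∧ K < 8 then pos.getD K.toNat 0 else -1

-- ===== PRECONDITION & SPEC =====
def Spec_solve (A : List Int) (K : Int) (out : Int) : Prop := out = solve_alt A K
instance (A : List Int) (K : Int) (out : Int) : Decidable (Spec_solve A K out) := by unfold Spec_solve; infer_instance

-- ===== CLAIM (what is proved, stated in full; the proofs are below) =====
def Claim_equal_solve : Prop := ∀ (A : List Int) (K : Int), Dom_solve A K → Spec_solve A K (solve A K)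

-- ===== LEMMAS AND PROOFS =====

-- The coupling invariant: P and pos are mutually inverse maps on 0..7.
def PRel (P pos : List Int) : Prop :=
  P.length = 8 ∧ pos.length = 8 ∧
  (∀ t : Nat, t < 8 → ∃ k : Nat, k < 8 ∧ P.getD t 0 = (k : Int) ∧ pos.getD k 0 = (t : Int)) ∧
  (∀ k : Nat, k < 8 → ∃ t : Nat, t < 8 ∧ pos.getD k 0 = (t : Int) ∧ P.getD t 0 = (k : Int))

theorem rel_init : PRel ((List.range 8).map (fun n => (n : Int))) ((List.range 8).map (fun n => (n : Int))) := by
  unfold PRel; decide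

theorem getD_set_eq (l : List Int) (a : Nat) (v : Int) (h : a < l.length) :
    (l.set a v).getD a 0 = v := by
  simp [List.getD_eq_getElem?_getD, h]

theorem getD_set_ne (l : List Int) (a b : Nat) (v : Int) (h : a ≠ b) :
    (l.set a v).getD b 0 = l.getD b 0 := by
  simp [List.getD_eq_getElem?_getD, List.getElem?_set_ne h]

theorem getD_ss (l : List Int) (a b : Nat) (u v : Int) (x : Nat)
    (ha : a < l.length) (hb : b < l.length) :
    ((l.set a u).set b v).getD x 0 =
      if x = b then v else if x = a then u else l.getD x 0 := by
  by_cases hxb : x = b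
  · subst hxb
    rw [getD_set_eq _ _ _ (by simpa using hb)]
    simp
  · rw [getD_set_ne _ _ _ _ (Ne.symm hxb)]
    by_cases hxa : x = a
    · subst hxa
      rw [getD_set_eq _ _ _ ha]
      simp [hxb]
    · rw [getD_set_ne _ _ _ _ (Ne.symm hxa)]
      simp [hxa, hxb]

theorem rel_swap (P pos : List Int) (i j ti tj : Nat)
    (hrel : PRel P pos) (hi : i < 8) (hj : j < 8) (hij : i ≠ j)
    (hti : ti < 8) (htj : tj < 8)
    (hposi : pos.getD i 0 = (ti : Int)) (hposj : pos.getD j 0 = (tj : Int))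
    (hPti : P.getD ti 0 = (i : Int)) (hPtj : P.getD tj 0 = (j : Int)) :
    PRel ((P.set ti (P.getD tj 0)).set tj (P.getD ti 0))
        ((pos.set i (pos.getD j 0)).set j (pos.getD i 0)) := by
  obtain ⟨hP8, hp8, h1, h2⟩ := hrel
  have hPl : ti < P.length := by omega
  have hPl' : tj < P.length := by omega
  have hpl : i < pos.length := by omega
  have hpl' : j < pos.length := by omega
  have htij : ti ≠ tj := by
    intro e; apply hij
    have : (i : Int) = (j : Int) := by rw [← hPti, ← hPtj, e]
    exact_mod_cast this
  refine ⟨by simp [hP8], by simp [hp8], ?_, ?_⟩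
  · intro t ht
    by_cases hti' : t = ti
    · refine ⟨j, hj, ?_, ?_⟩
      · rw [getD_ss P ti tj _ _ _ hPl hPl', if_neg (by rw [hti']; exact htij), if_pos hti', hPtj]
      · rw [getD_ss pos i j _ _ _ hpl hpl', if_pos rfl, hposi, hti']
    · by_cases htj' : t = tj
      · refine ⟨i, hi, ?_, ?_⟩
        · rw [getD_ss P ti tj _ _ _ hPl hPl', if_pos htj', hPti]
        · rw [getD_ss pos i j _ _ _ hpl hpl', if_neg hij, if_pos rfl, hposj, htj']
      · obtain ⟨k, hk, hPk, hpk⟩ := h1 t ht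
        have hki : ¬k = i := by
          intro e; apply hti'
          rw [e] at hpk; rw [hposi] at hpk; exact_mod_cast hpk.symm
        have hkj : ¬k = j := by
          intro e; apply htj'
          rw [e] at hpk; rw [hposj] at hpk; exact_mod_cast hpk.symm
        refine ⟨k, hk, ?_, ?_⟩
        · rw [getD_ss P ti tj _ _ _ hPl hPl', if_neg htj', if_neg hti']; exact hPk
        · rw [getD_ss pos i j _ _ _ hpl hpl', if_neg hkj, if_neg hki]; exact hpk
  · intro k hk
    by_cases hki : k = i
    · refine ⟨tj, htj, ?_, ?_⟩
      · rw [getD_ss pos i j _ _ _ hpl hpl', if_neg (by rw [hki]; exact hij), if_pos hki, hposj]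
      · rw [getD_ss P ti tj _ _ _ hPl hPl', if_pos rfl, hPti, hki]
    · by_cases hkj : k = j
      · refine ⟨ti, hti, ?_, ?_⟩
        · rw [getD_ss pos i j _ _ _ hpl hpl', if_pos hkj, hposi]
        · rw [getD_ss P ti tj _ _ _ hPl hPl', if_neg htij, if_pos rfl, hPtj, hkj]
      · obtain ⟨t, ht, hpk, hPk⟩ := h2 k hk
        have hti' : ¬t = ti := by
          intro e; apply hki
          rw [e] at hPk; rw [hPti] at hPk; exact_mod_cast hPk.symm
        have htj' : ¬t = tj := by
          intro e; apply hkj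
          rw [e] at hPk; rw [hPtj] at hPk; exact_mod_cast hPk.symm
        refine ⟨t, ht, ?_, ?_⟩
        · rw [getD_ss pos i j _ _ _ hpl hpl', if_neg hkj, if_neg hki]; exact hpk
        · rw [getD_ss P ti tj _ _ _ hPl hPl', if_neg htj', if_neg hti']; exact hPk

-- the two positions holding keys i and j come out of the position scan as a sorted pair
theorem filter_pair (a b : Fin 8) (hab : a ≠ b) :
    (List.range 8).filter (fun t => (t == a.val) || (t == b.val)) =
      if a.val < b.val then [a.val, b.val] else [b.val, a.val] := by
  revert hab; revert a b; decide

theorem find?_unique {α : Type} {p : α → Bool} {t : α} :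
    ∀ (l : List α), (∀ x ∈ l, (p x = true ↔ x = t)) → t ∈ l → l.find? p = some t := by
  intro l
  induction l with
  | nil => intro _ h; simp at h
  | cons a l ih =>
    intro h hm
    by_cases ha : a = t
    · subst ha; simp [List.find?, (h a (by simp)).mpr rfl]
    · have hpa : p a = false := by
        cases hb : p a
        · rfl
        · exact absurd ((h a (by simp)).mp hb) ha
      have hm' : t ∈ l := by
        cases hm with
        | head => exact absurd rfl ha
        | tail _ h1 => exact h1
      simp only [List.find?, hpa]
      exact ih (fun x hx => h x (by simp [hx])) hm'

theorem rel_step (P pos : List Int) (cmd : Int) (hrel : PRel P pos) :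
    PRel (pyChange P cmd) (altStep pos cmd) := by
  unfold pyChange altStep
  rw [PySem.List.foldl_append_if_eq_filter]
  simp only [List.nil_append]
  rcases hbits : (List.range 8).filter (fun (x : Nat) => PySem.Int.band ((1 : Int) <<< x) cmd != 0) with
    _ | ⟨i, _ | ⟨j, _ | _⟩⟩ <;> try exact hrel
  -- exactly two bits i, j
  have hnd : (i :: j :: []).Nodup := by
    rw [← hbits]; exact (List.nodup_range).filter _
  have hij : i ≠ j := by simp at hnd; exact hnd
  have hi : i < 8 := by
    have : i ∈ (List.range 8).filter (fun (x : Nat) => PySem.Int.band ((1 : Int) <<< x) cmd != 0) := by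
      rw [hbits]; simp
    simpa using List.mem_range.mp (List.mem_of_mem_filter this)
  have hj : j < 8 := by
    have : j ∈ (List.range 8).filter (fun (x : Nat) => PySem.Int.band ((1 : Int) <<< x) cmd != 0) := by
      rw [hbits]; simp
    simpa using List.mem_range.mp (List.mem_of_mem_filter this)
  obtain ⟨hP8, hp8, h1, h2⟩ := hrel
  obtain ⟨ti, hti, hposi, hPti⟩ := h2 i hi
  obtain ⟨tj, htj, hposj, hPtj⟩ := h2 j hj
  have htij : ti ≠ tj := by
    intro e; apply hij
    have : (i : Int) = (j : Int) := by rw [← hPti, ← hPtj, e]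
    exact_mod_cast this
  -- the position scan finds exactly {ti, tj}
  have hfc : (List.range 8).filter (fun (x : Nat) => (P.getD x 0 == (i : Int)) || (P.getD x 0 == (j : Int)))
      = (List.range 8).filter (fun t => (t == ti) || (t == tj)) := by
    apply List.filter_congr
    intro x hx
    have hx8 : x < 8 := List.mem_range.mp hx
    obtain ⟨k, hk, hPk, hpk⟩ := h1 x hx8
    have e1 : (P.getD x 0 = (i : Int)) ↔ x = ti := by
      constructor
      · intro e
        have hki : k = i := by
          have : (k : Int) = (i : Int) := by rw [← hPk, e]
          exact_mod_cast this
        rw [hki] at hpk; rw [hposi] at hpk; exact_mod_cast hpk.symm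
      · intro e; rw [e]; exact hPti
    have e2 : (P.getD x 0 = (j : Int)) ↔ x = tj := by
      constructor
      · intro e
        have hkj : k = j := by
          have : (k : Int) = (j : Int) := by rw [← hPk, e]
          exact_mod_cast this
        rw [hkj] at hpk; rw [hposj] at hpk; exact_mod_cast hpk.symm
      · intro e; rw [e]; exact hPtj
    rw [Bool.eq_iff_iff]
    simp only [Bool.or_eq_true, beq_iff_eq]
    rw [e1, e2]
  have hBs : (List.range 8).foldl
      (fun (acc : List Nat) (x : Nat) =>
        if (P.getD x 0 == (i : Int)) || (P.getD x 0 == (j : Int)) then acc ++ [x] else acc) []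
      = if ti < tj then [ti, tj] else [tj, ti] := by
    rw [PySem.List.foldl_append_if_eq_filter]
    simp only [List.nil_append]
    rw [hfc, filter_pair ⟨ti, hti⟩ ⟨tj, htj⟩ (by simpa [Fin.ext_iff] using htij)]
  have hswap := rel_swap P pos i j ti tj ⟨hP8, hp8, h1, h2⟩ hi hj hij hti htj hposi hposj hPti hPtj
  dsimp only
  by_cases hlt : ti < tj
  · rw [if_pos hlt] at hBs
    rw [hBs]
    exact hswap
  · rw [if_neg hlt] at hBs
    rw [hBs]
    dsimp only
    rw [List.set_comm _ _ (Ne.symm htij)]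
    exact hswap

theorem rel_fold (cmds : List Int) :
    ∀ (P pos : List Int), PRel P pos → PRel (cmds.foldl pyChange P) (cmds.foldl altStep pos) := by
  induction cmds with
  | nil => intro P pos h; exact h
  | cons c cs ih => intro P pos h; exact ih _ _ (rel_step P pos c h)

theorem final_eq (K : Int) (P pos : List Int) (hrel : PRel P pos) :
    (match (List.range 8).find? (fun t => P.getD t 0 == K) with
     | some t => (t : Int) | none => -1) =
    (if 0 ≤ K ∧ K < 8 then pos.getD K.toNat 0 else -1) := by
  obtain ⟨hP8, hp8, h1, h2⟩ := hrel
  by_cases hK : 0 ≤ K ∧ K < 8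
  · obtain ⟨hK0, hK8⟩ := hK
    have hk8 : K.toNat < 8 := by omega
    have hKcast : (K.toNat : Int) = K := Int.toNat_of_nonneg hK0
    obtain ⟨t, ht, hpk, hPk⟩ := h2 K.toNat hk8
    have hfind : (List.range 8).find? (fun t => P.getD t 0 == K) = some t := by
      apply find?_unique
      · intro x hx
        have hx8 : x < 8 := List.mem_range.mp hx
        simp only [beq_iff_eq]
        constructor
        · intro e
          obtain ⟨k, hk, hPx, hpx⟩ := h1 x hx8
          have hkK : k = K.toNat := by
            have : (k : Int) = (K.toNat : Int) := by rw [hKcast, ← e, hPx]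
            exact_mod_cast this
          rw [hkK] at hpx; rw [hpk] at hpx; exact_mod_cast hpx.symm
        · intro e; rw [e, hPk, hKcast]
      · exact List.mem_range.mpr ht
    rw [hfind]
    rw [if_pos ⟨hK0, hK8⟩, hpk]
  · have hfind : (List.range 8).find? (fun t => P.getD t 0 == K) = none := by
      apply List.find?_eq_none.mpr
      intro x hx
      have hx8 : x < 8 := List.mem_range.mp hx
      obtain ⟨k, hk, hPx, _⟩ := h1 x hx8
      simp only [beq_iff_eq, hPx]
      intro e
      apply hK
      constructor
      · rw [← e]; exact_mod_cast Nat.zero_le k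
      · rw [← e]; exact_mod_cast hk
    rw [hfind, if_neg hK]

-- ===== VERDICT (by name: the statement is the Claim_ definition above) =====
theorem solve_spec : Claim_equal_solve := by
  intro A K _
  unfold Spec_solve solve solve_alt
  exact final_eq K _ _ (rel_fold A _ _ rel_init)
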